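-- pv_equiv track=rewrite | github.com/illottodimax/Archivio | spazio.py | genera_previsione_armonica
-- ===== SOURCE A (Python) =====
-- from collections import defaultdict
--
-- def genera_previsione_spia(archivio, numero_spia, num_previsione):
--     numeri_conseguenti = []
--     for i in range(len(archivio) - 1):
--         if numero_spia in archivio[i]['numeri']: numeri_conseguenti.extend(archivio[i+1]['numeri'])
--     if not numeri_conseguenti: return None
--     frequenze = defaultdict(int)
--     for n in numeri_conseguenti: frequenze[n] += 1
--     previsione_ordinata = sorted(frequenze.items(), key=lambda x: x[1], reverse=True)
--     return [num for num, freq in previsione_ordinata[:num_previsione]]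
--
-- def genera_previsione_spia_incrociata(archivio_fonte, archivio_dest, numero_spia, num_previsione):
--     numeri_conseguenti = []; len_min = min(len(archivio_fonte), len(archivio_dest))
--     for i in range(len_min - 1):
--         if numero_spia in archivio_fonte[i]['numeri']: numeri_conseguenti.extend(archivio_dest[i+1]['numeri'])
--     if not numeri_conseguenti: return None
--     frequenze = defaultdict(int)
--     for n in numeri_conseguenti: frequenze[n] += 1
--     previsione_ordinata = sorted(frequenze.items(), key=lambda x: x[1], reverse=True)
--     return [num for num, freq in previsione_ordinata[:num_previsione]]
--
-- def genera_previsione_armonica(archivio_fonte_finestra, archivio_dest_finestra, num_previsione_per_spia, numeri_spia_sorgente):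
--     """
--     Versione CORRETTA e RESA PIU' FLESSIBILE. Ora elabora direttamente la finestra di archivio
--     che le viene passata, senza fare ulteriori selezioni.
--     """
--     is_incrociato = (id(archivio_fonte_finestra) != id(archivio_dest_finestra))
--     convergenze_totali = defaultdict(int)
--
--     # 1. & 2. Genera una previsione per ognuno dei 5 numeri spia
--     for spia in numeri_spia_sorgente:
--         # Usa le funzioni spia come motore interno, passando direttamente la finestra ricevuta
--         prev = genera_previsione_spia_incrociata(archivio_fonte_finestra, archivio_dest_finestra, spia, num_previsione_per_spia) if is_incrociato else genera_previsione_spia(archivio_fonte_finestra, spia, num_previsione_per_spia)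
--
--         # 3. Mette tutti i numeri nel "calderone" e li conta
--         if prev:
--             for numero in prev:
--                 convergenze_totali[numero] += 1
--
--     # 4. Ordina TUTTI i numeri trovati in base alla loro frequenza
--     previsione_completa_ordinata = sorted(convergenze_totali.items(), key=lambda x: x[1], reverse=True)
--
--     # 5. Estrae i primi 5 numeri più frequenti
--     previsione_finale = previsione_completa_ordinata[:5]
--
--     return previsione_finale
-- ===== SOURCE B (Python) =====
-- def genera_previsione_armonica(archivio_fonte_finestra, archivio_dest_finestra, num_previsione_per_spia, numeri_spia_sorgente):
--     # Single pass over the window: collect each spia's consequent numbers once,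
--     # instead of re-scanning the whole window for every spia.
--     limit = min(len(archivio_fonte_finestra), len(archivio_dest_finestra)) - 1
--     spia_keys = list(dict.fromkeys(numeri_spia_sorgente))
--     raccolta = {s: [] for s in spia_keys}
--     for i in range(limit):
--         trig = archivio_fonte_finestra[i].get('numeri', [])
--         dest = archivio_dest_finestra[i + 1].get('numeri', [])
--         for s in spia_keys:
--             if s in trig:
--                 raccolta[s] = raccolta[s] + dest
--     totale = []
--     for s in numeri_spia_sorgente:
--         cons = raccolta[s]
--         if cons:
--             coppie = [(n, cons.count(n)) for n in dict.fromkeys(cons)]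
--             top = [n for n, c in sorted(coppie, key=lambda x: x[1], reverse=True)[:num_previsione_per_spia]]
--             totale = totale + top
--     finale = [(n, totale.count(n)) for n in dict.fromkeys(totale)]
--     return sorted(finale, key=lambda x: x[1], reverse=True)[:5]
-- ===== Notes on version B (the rewrite author's own statement) =====
-- stated objective: alternative
-- what changed: B replaces A's per-spia full rescans of the window (each via the spia/incrociata engine) by one single pass over the window that collects every spia's consequent numbers at once into a keyed map, and counts by ordered dedup + count instead of an incrementally updated counter dict; the id()-based crossed/uncrossed branch disappears since both branches compute the same value.
import Mathlib
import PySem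

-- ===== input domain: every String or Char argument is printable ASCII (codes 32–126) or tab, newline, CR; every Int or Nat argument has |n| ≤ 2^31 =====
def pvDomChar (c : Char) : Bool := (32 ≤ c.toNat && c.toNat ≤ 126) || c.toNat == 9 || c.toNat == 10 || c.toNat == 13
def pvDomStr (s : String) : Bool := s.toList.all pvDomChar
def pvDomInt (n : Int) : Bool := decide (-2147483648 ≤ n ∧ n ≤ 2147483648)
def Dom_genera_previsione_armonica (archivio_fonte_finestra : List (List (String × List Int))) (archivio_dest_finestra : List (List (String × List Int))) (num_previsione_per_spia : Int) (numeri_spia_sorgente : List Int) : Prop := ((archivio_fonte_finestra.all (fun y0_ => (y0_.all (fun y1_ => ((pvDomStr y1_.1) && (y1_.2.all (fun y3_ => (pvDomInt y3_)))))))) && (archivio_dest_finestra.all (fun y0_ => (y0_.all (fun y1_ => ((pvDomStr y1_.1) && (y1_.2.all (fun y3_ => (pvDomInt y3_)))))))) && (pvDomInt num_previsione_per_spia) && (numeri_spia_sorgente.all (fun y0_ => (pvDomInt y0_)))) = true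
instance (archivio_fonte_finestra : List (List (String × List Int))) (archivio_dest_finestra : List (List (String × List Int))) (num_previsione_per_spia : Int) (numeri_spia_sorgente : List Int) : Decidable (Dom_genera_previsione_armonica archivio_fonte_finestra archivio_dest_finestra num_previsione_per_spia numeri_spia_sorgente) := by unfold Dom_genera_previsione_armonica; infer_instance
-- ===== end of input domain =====

-- B replaces A's per-spia rescans of the window by one single pass that collects every spia's
-- consequents at once, counts by ordered dedup + count instead of an incremented counter dict
-- (objective: alternative decomposition, same complexity on these window sizes).


-- ===== PORT A =====
-- archivio[i]['numeri']: first-match dict lookup; the KeyError on a batch without 'numeri'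
-- is excluded by Pre_ below, [] stands in for the raised case.
def pvA_numeri (e : List (String × List Int)) : List Int :=
  (PySem.Dict.mk e).getD "numeri" []

-- genera_previsione_spia (the indices produced by range are always in bounds, so pyGetD's default is never used)
def pvA_spia (archivio : List (List (String × List Int))) (numero_spia : Int) (num_previsione : Int) : Option (List Int) :=
  let numeri_conseguenti :=
    (PySem.List.pyRange 0 ((archivio.length : Int) - 1) 1).foldl
      (fun acc i =>
        if numero_spia ∈ pvA_numeri (PySem.List.pyGetD archivio i []) then
          acc ++ pvA_numeri (PySem.List.pyGetD archivio (i + 1) [])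
        else acc) []
  if numeri_conseguenti = [] then none
  else
    let frequenze := numeri_conseguenti.foldl (fun d n => d.modify n 0 (· + 1)) (PySem.Dict.empty : PySem.Dict Int Int)
    some ((PySem.List.slice (PySem.List.sorted frequenze.items (fun x => x.2) true) none (some num_previsione)).map (·.1))

-- genera_previsione_spia_incrociata
def pvA_spia_incrociata (archivio_fonte archivio_dest : List (List (String × List Int))) (numero_spia : Int) (num_previsione : Int) : Option (List Int) :=
  let len_min := min (archivio_fonte.length : Int) (archivio_dest.length : Int)
  let numeri_conseguenti :=
    (PySem.List.pyRange 0 (len_min - 1) 1).foldl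
      (fun acc i =>
        if numero_spia ∈ pvA_numeri (PySem.List.pyGetD archivio_fonte i []) then
          acc ++ pvA_numeri (PySem.List.pyGetD archivio_dest (i + 1) [])
        else acc) []
  if numeri_conseguenti = [] then none
  else
    let frequenze := numeri_conseguenti.foldl (fun d n => d.modify n 0 (· + 1)) (PySem.Dict.empty : PySem.Dict Int Int)
    some ((PySem.List.slice (PySem.List.sorted frequenze.items (fun x => x.2) true) none (some num_previsione)).map (·.1))

-- Python's `id(fonte) != id(dest)` is object identity; ported as value inequality: when the two
-- windows are equal as values the two branches compute the same list, so this is value-faithful.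
def genera_previsione_armonica (archivio_fonte_finestra : List (List (String × List Int))) (archivio_dest_finestra : List (List (String × List Int))) (num_previsione_per_spia : Int) (numeri_spia_sorgente : List Int) : List (Int × Int) :=
  let convergenze_totali := numeri_spia_sorgente.foldl
    (fun conv spia =>
      let prev := if archivio_fonte_finestra ≠ archivio_dest_finestra
        then pvA_spia_incrociata archivio_fonte_finestra archivio_dest_finestra spia num_previsione_per_spia
        else pvA_spia archivio_fonte_finestra spia num_previsione_per_spia
      match prev with
      | none => conv
      | some p => if p = [] then conv else p.foldl (fun c n => c.modify n 0 (· + 1)) conv)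
    (PySem.Dict.empty : PySem.Dict Int Int)
  PySem.List.slice (PySem.List.sorted convergenze_totali.items (fun x => x.2) true) none (some 5)

-- ===== PORT B =====
-- batch.get('numeri', [])
def pvB_numeri (e : List (String × List Int)) : List Int :=
  (PySem.Dict.mk e).getD "numeri" []

-- the single collecting pass: {s: [] for s in spia_keys}, then one walk over the window
def pvB_raccolta (archivio_fonte_finestra archivio_dest_finestra : List (List (String × List Int))) (spia_keys : List Int) : PySem.Dict Int (List Int) :=
  let limit := min (archivio_fonte_finestra.length : Int) (archivio_dest_finestra.length : Int) - 1
  let init : PySem.Dict Int (List Int) := spia_keys.foldl (fun d s => d.insert s []) PySem.Dict.empty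
  (PySem.List.pyRange 0 limit 1).foldl
    (fun d i =>
      let trig := pvB_numeri (PySem.List.pyGetD archivio_fonte_finestra i [])
      let dest := pvB_numeri (PySem.List.pyGetD archivio_dest_finestra (i + 1) [])
      spia_keys.foldl (fun acc s => if s ∈ trig then acc.insert s (acc.getD s [] ++ dest) else acc) d)
    init

-- one spia's top numbers: ordered dedup + count, stable sort by frequency, slice, keep the numbers
def pvB_top (cons : List Int) (n : Int) : List Int :=
  (PySem.List.slice (PySem.List.sorted ((PySem.List.dedup cons).map (fun k => (k, (cons.count k : Int)))) (fun x => x.2) true) none (some n)).map (·.1)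

def genera_previsione_armonica_alt (archivio_fonte_finestra : List (List (String × List Int))) (archivio_dest_finestra : List (List (String × List Int))) (num_previsione_per_spia : Int) (numeri_spia_sorgente : List Int) : List (Int × Int) :=
  let raccolta := pvB_raccolta archivio_fonte_finestra archivio_dest_finestra (PySem.List.dedup numeri_spia_sorgente)
  let totale := numeri_spia_sorgente.foldl
    (fun tot s =>
      let cons := raccolta.getD s []
      if cons = [] then tot else tot ++ pvB_top cons num_previsione_per_spia)
    []
  let finale := (PySem.List.dedup totale).map (fun k => (k, (totale.count k : Int)))
  PySem.List.slice (PySem.List.sorted finale (fun x => x.2) true) none (some 5)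

-- ===== PRECONDITION & SPEC =====
-- Pre_ excludes exactly the inputs on which A raises KeyError: with a nonempty spia list, a scanned
-- source batch without key 'numeri', or a destination batch without 'numeri' that some spia triggers.
def Pre_genera_previsione_armonica (archivio_fonte_finestra : List (List (String × List Int))) (archivio_dest_finestra : List (List (String × List Int))) (num_previsione_per_spia : Int) (numeri_spia_sorgente : List Int) : Prop :=
  numeri_spia_sorgente = [] ∨
  ∀ i ∈ List.range (min archivio_fonte_finestra.length archivio_dest_finestra.length - 1),
    (PySem.Dict.mk (archivio_fonte_finestra.getD i [])).contains "numeri" = true ∧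
    ((∃ s ∈ numeri_spia_sorgente, s ∈ (PySem.Dict.mk (archivio_fonte_finestra.getD i [])).getD "numeri" []) →
      (PySem.Dict.mk (archivio_dest_finestra.getD (i + 1) [])).contains "numeri" = true)
instance (archivio_fonte_finestra : List (List (String × List Int))) (archivio_dest_finestra : List (List (String × List Int))) (num_previsione_per_spia : Int) (numeri_spia_sorgente : List Int) : Decidable (Pre_genera_previsione_armonica archivio_fonte_finestra archivio_dest_finestra num_previsione_per_spia numeri_spia_sorgente) := by unfold Pre_genera_previsione_armonica; infer_instance

def pvWitness_genera_previsione_armonica : (List (List (String × List Int))) × (List (List (String × List Int))) × Int × List Int :=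
  ([[("numeri", [1, 2])], [("numeri", [3])]], [[("numeri", [1])], [("numeri", [7, 8])]], 1, [1, 2])

def Spec_genera_previsione_armonica (archivio_fonte_finestra : List (List (String × List Int))) (archivio_dest_finestra : List (List (String × List Int))) (num_previsione_per_spia : Int) (numeri_spia_sorgente : List Int) (out : List (Int × Int)) : Prop := out = genera_previsione_armonica_alt archivio_fonte_finestra archivio_dest_finestra num_previsione_per_spia numeri_spia_sorgente
instance (archivio_fonte_finestra : List (List (String × List Int))) (archivio_dest_finestra : List (List (String × List Int))) (num_previsione_per_spia : Int) (numeri_spia_sorgente : List Int) (out : List (Int × Int)) : Decidable (Spec_genera_previsione_armonica archivio_fonte_finestra archivio_dest_finestra num_previsione_per_spia numeri_spia_sorgente out) := by unfold Spec_genera_previsione_armonica; infer_instance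

-- ===== CLAIM (what is proved, stated in full; the proofs are below) =====
def Claim_equal_genera_previsione_armonica : Prop := ∀ (archivio_fonte_finestra : List (List (String × List Int))) (archivio_dest_finestra : List (List (String × List Int))) (num_previsione_per_spia : Int) (numeri_spia_sorgente : List Int), Dom_genera_previsione_armonica archivio_fonte_finestra archivio_dest_finestra num_previsione_per_spia numeri_spia_sorgente → Pre_genera_previsione_armonica archivio_fonte_finestra archivio_dest_finestra num_previsione_per_spia numeri_spia_sorgente → Spec_genera_previsione_armonica archivio_fonte_finestra archivio_dest_finestra num_previsione_per_spia numeri_spia_sorgente (genera_previsione_armonica archivio_fonte_finestra archivio_dest_finestra num_previsione_per_spia numeri_spia_sorgente)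

-- ===== LEMMAS AND PROOFS =====

-- trigger / destination numbers of window slot i, and the consequent list one spia collects
def pvTrig (f : List (List (String × List Int))) (i : Int) : List Int :=
  pvA_numeri (PySem.List.pyGetD f i [])

def pvDest (d : List (List (String × List Int))) (i : Int) : List Int :=
  pvA_numeri (PySem.List.pyGetD d (i + 1) [])

def pvCons (f d : List (List (String × List Int))) (s : Int) : List Int :=
  (PySem.List.pyRange 0 (min (f.length : Int) (d.length : Int) - 1) 1).foldl
    (fun acc i => if s ∈ pvTrig f i then acc ++ pvDest d i else acc) []

-- what one spia contributes to the cauldron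
def pvEmit (f d : List (List (String × List Int))) (n s : Int) : List Int :=
  if pvCons f d s = [] then [] else pvB_top (pvCons f d s) n

-- the two spia engines agree when the two windows are the same value
theorem pv_branch_eq (f d : List (List (String × List Int))) (s n : Int) :
    (if f ≠ d then pvA_spia_incrociata f d s n else pvA_spia f s n) = pvA_spia_incrociata f d s n := by
  by_cases h : f = d
  · subst h
    simp only [ne_eq, not_true_eq_false, ite_false]
    unfold pvA_spia pvA_spia_incrociata
    simp [min_self]
  · simp [h]

-- A's spia engine, rewritten through counter/items into B's dedup+count form
theorem pv_spiaIncr_eq (f d : List (List (String × List Int))) (s n : Int) :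
    pvA_spia_incrociata f d s n =
      if pvCons f d s = [] then none else some (pvB_top (pvCons f d s) n) := by
  unfold pvA_spia_incrociata pvCons pvB_top pvTrig pvDest
  rw [show (fun (d' : PySem.Dict Int Int) (n' : Int) => d'.modify n' 0 (· + 1)) = (fun d' n' => d'.modify n' 0 (· + 1)) from rfl]
  simp only [← PySem.Dict.counter_eq_foldl, PySem.Dict.items_counter, PySem.List.dedup_eq_ofList]

-- initialisation: {s : [] for s in spia_keys}
theorem pv_init_get? (L : List Int) (d0 : PySem.Dict Int (List Int)) (x : Int) :
    (L.foldl (fun d s => d.insert s []) d0).get? x = if x ∈ L then some [] else d0.get? x := by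
  induction L generalizing d0 with
  | nil => simp
  | cons k t ih =>
    simp only [List.foldl_cons, ih, List.mem_cons]
    by_cases hx : x ∈ t
    · simp [hx]
    · by_cases hk : x = k
      · subst hk; simp [hx, PySem.Dict.get?_insert_self]
      · simp only [hx, hk, or_self, if_false]
        exact PySem.Dict.get?_insert_of_ne _ _ hk

-- one window slot: the keyed update fold, described by get?
theorem pv_inner_get? (ks : List Int) (trig dest : List Int) (d : PySem.Dict Int (List Int)) (x : Int)
    (hnd : ks.Nodup) :
    (ks.foldl (fun acc s => if s ∈ trig then acc.insert s (acc.getD s [] ++ dest) else acc) d).get? x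
      = if x ∈ ks ∧ x ∈ trig then some (d.getD x [] ++ dest) else d.get? x := by
  induction ks generalizing d with
  | nil => simp
  | cons k t ih =>
    have hknt : k ∉ t := (List.nodup_cons.mp hnd).1
    have hndt : t.Nodup := (List.nodup_cons.mp hnd).2
    simp only [List.foldl_cons]
    by_cases hkt : k ∈ trig
    · rw [if_pos hkt, ih _ hndt]
      by_cases hxk : x = k
      · subst hxk
        rw [if_neg (fun h => hknt h.1), PySem.Dict.get?_insert_self,
            if_pos ⟨List.mem_cons_self, hkt⟩]
      · have hgd : (d.insert k (d.getD k [] ++ dest)).getD x [] = d.getD x [] := by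
          rw [PySem.Dict.getD_eq_get?_getD, PySem.Dict.get?_insert_of_ne _ _ hxk,
              ← PySem.Dict.getD_eq_get?_getD]
        rw [hgd, PySem.Dict.get?_insert_of_ne _ _ hxk]
        by_cases hc : x ∈ t ∧ x ∈ trig
        · rw [if_pos hc, if_pos ⟨List.mem_cons_of_mem _ hc.1, hc.2⟩]
        · rw [if_neg hc, if_neg (by
            rintro ⟨hm, htr⟩
            rcases List.mem_cons.mp hm with h | h
            · exact hxk h
            · exact hc ⟨h, htr⟩)]
    · rw [if_neg hkt, ih _ hndt]
      by_cases hc : x ∈ t ∧ x ∈ trig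
      · rw [if_pos hc, if_pos ⟨List.mem_cons_of_mem _ hc.1, hc.2⟩]
      · rw [if_neg hc, if_neg (by
          rintro ⟨hm, htr⟩
          rcases List.mem_cons.mp hm with h | h
          · exact hkt (h ▸ htr)
          · exact hc ⟨h, htr⟩)]

-- whole scan: raccolta's content after the single pass
theorem pv_outer_get? (trig dest : Int → List Int) (keys : List Int) (hk : keys.Nodup)
    (R : List Int) (g : Int → List Int) (d : PySem.Dict Int (List Int))
    (hd : ∀ y, d.get? y = if y ∈ keys then some (g y) else none) (x : Int) :
    (R.foldl (fun d i =>
        keys.foldl (fun acc s => if s ∈ trig i then acc.insert s (acc.getD s [] ++ dest i) else acc) d) d).get? x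
      = if x ∈ keys then some (R.foldl (fun acc i => if x ∈ trig i then acc ++ dest i else acc) (g x)) else none := by
  induction R generalizing d g with
  | nil => simpa using hd x
  | cons i R' ih =>
    simp only [List.foldl_cons]
    refine (ih (fun y => if y ∈ trig i then g y ++ dest i else g y) _ ?_ ).trans ?_
    · intro y
      rw [pv_inner_get? keys (trig i) (dest i) _ y hk]
      by_cases hy : y ∈ keys
      · have hgy : d.getD y [] = g y := by
          rw [PySem.Dict.getD_eq_get?_getD, hd y, if_pos hy]; rfl
        by_cases hyt : y ∈ trig i
        · simp [hy, hyt, hgy]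
        · simp [hy, hyt, hd y]
      · simp [hy, hd y]
    · by_cases hx : x ∈ keys <;> simp [hx]

-- counting fold pushed through list concatenation
theorem pv_counter_append (t e : List Int) :
    e.foldl (fun c x => c.modify x 0 (· + 1)) (PySem.Dict.counter t) = PySem.Dict.counter (t ++ e) := by
  rw [PySem.Dict.counter_eq_foldl t, PySem.Dict.counter_eq_foldl (t ++ e), List.foldl_append]

theorem pv_fold_counter (emit : Int → List Int) (sp t : List Int) :
    sp.foldl (fun c s => (emit s).foldl (fun c x => c.modify x 0 (· + 1)) c) (PySem.Dict.counter t)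
      = PySem.Dict.counter (sp.foldl (fun tot s => tot ++ emit s) t) := by
  induction sp generalizing t with
  | nil => simp
  | cons s sp' ih =>
    simp only [List.foldl_cons]
    rw [pv_counter_append t (emit s), ih]

-- B's raccolta, characterised: each spia key maps to exactly the consequents A would collect for it
theorem pv_raccolta_get? (f d : List (List (String × List Int))) (sp : List Int) (x : Int) :
    (pvB_raccolta f d (PySem.List.dedup sp)).get? x
      = if x ∈ PySem.List.dedup sp then some (pvCons f d x) else none := by
  have h0 : ∀ y, ((PySem.List.dedup sp).foldl (fun dd s => dd.insert s ([] : List Int)) PySem.Dict.empty).get? y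
      = if y ∈ PySem.List.dedup sp then some ([] : List Int) else none := by
    intro y
    rw [pv_init_get?]
    simp [PySem.Dict.get?_empty]
  exact pv_outer_get? (fun i => pvB_numeri (PySem.List.pyGetD f i []))
    (fun i => pvB_numeri (PySem.List.pyGetD d (i + 1) []))
    (PySem.List.dedup sp) (PySem.List.nodup_dedup sp)
    (PySem.List.pyRange 0 (min (f.length : Int) (d.length : Int) - 1) 1)
    (fun _ => []) _ h0 x

-- ===== VERDICT (by name: the statement is the Claim_ definition above) =====
theorem genera_previsione_armonica_spec : Claim_equal_genera_previsione_armonica := by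
  intro f d n sp _ _
  unfold Spec_genera_previsione_armonica
  have hgetD : ∀ s ∈ sp, (pvB_raccolta f d (PySem.List.dedup sp)).getD s [] = pvCons f d s := by
    intro s hs
    rw [PySem.Dict.getD_eq_get?_getD, pv_raccolta_get?,
        if_pos ((PySem.List.mem_dedup sp s).mpr hs)]
    rfl
  -- both sides reduce to the same cauldron list T
  have htotB : sp.foldl
      (fun tot s =>
        let cons := (pvB_raccolta f d (PySem.List.dedup sp)).getD s []
        if cons = [] then tot else tot ++ pvB_top cons n) []
      = sp.foldl (fun tot s => tot ++ pvEmit f d n s) [] := by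
    refine PySem.List.foldl_congr_mem _ _ _ _ ?_
    intro tot s hs
    simp only
    rw [hgetD s hs]
    unfold pvEmit
    by_cases h : pvCons f d s = [] <;> simp [h]
  have hstepA : (fun (conv : PySem.Dict Int Int) spia =>
      match (if f ≠ d then pvA_spia_incrociata f d spia n else pvA_spia f spia n) with
      | none => conv
      | some p => if p = [] then conv else p.foldl (fun c x => c.modify x 0 (· + 1)) conv)
      = fun conv spia => (pvEmit f d n spia).foldl (fun c x => c.modify x 0 (· + 1)) conv := by
    funext conv spia
    rw [pv_branch_eq, pv_spiaIncr_eq]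
    unfold pvEmit
    by_cases h : pvCons f d spia = []
    · simp [h]
    · rw [if_neg h, if_neg h]
      by_cases hp : pvB_top (pvCons f d spia) n = [] <;> simp [hp]
  have hA : genera_previsione_armonica f d n sp
      = PySem.List.slice (PySem.List.sorted
          ((PySem.Dict.counter (sp.foldl (fun tot s => tot ++ pvEmit f d n s) [])).items)
          (fun x => x.2) true) none (some 5) := by
    unfold genera_previsione_armonica
    rw [hstepA,
        show (PySem.Dict.empty : PySem.Dict Int Int) = PySem.Dict.counter ([] : List Int) from rfl,
        pv_fold_counter]
  rw [hA]
  show _ = PySem.List.slice (PySem.List.sorted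
      ((PySem.List.dedup (sp.foldl
          (fun tot s =>
            let cons := (pvB_raccolta f d (PySem.List.dedup sp)).getD s []
            if cons = [] then tot else tot ++ pvB_top cons n) [])).map
        (fun k => (k, ((sp.foldl
          (fun tot s =>
            let cons := (pvB_raccolta f d (PySem.List.dedup sp)).getD s []
            if cons = [] then tot else tot ++ pvB_top cons n) []).count k : Int))))
      (fun x => x.2) true) none (some 5)
  rw [htotB, PySem.Dict.items_counter, ← PySem.List.dedup_eq_ofList]
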